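-- pv_equiv track=rewrite | github.com/ufora/ufora | build/cppml.py | addGCCLineNumberDirective
-- ===== SOURCE A (Python) =====
-- def addGCCLineNumberDirective(contents, path, isCoverageBuild):
--     if isCoverageBuild:
--         # we don't want to mess with line numbers when measuring code coverage
--         return contents
--     else:
--         contents = contents.split("\n")
--         lineNumber = 1
--         outContents = []
--         lastLineEndedInBackslash = False
--         for line in contents:
--             if not lastLineEndedInBackslash:
--                 outContents.append('#line %d "%s"' % (lineNumber, path))
--             outContents.append(line)
--             lastLineEndedInBackslash = line.endswith("\\")
--             lineNumber += 1
--         return "\n".join(outContents)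
-- ===== SOURCE B (Python) =====
-- def addGCCLineNumberDirective(contents, path, isCoverageBuild):
--     if isCoverageBuild:
--         return contents
--     lines = contents.split("\n")
--     # pass 1: partition physical lines into logical-line groups (a group extends
--     # while its previous physical line ends in a backslash); record each group's
--     # first physical line number.
--     groups = []
--     start, cur = 1, [lines[0]]
--     for i, line in enumerate(lines[1:], 2):
--         if cur[-1].endswith("\\"):
--             cur.append(line)
--         else:
--             groups.append((start, cur))
--             start, cur = i, [line]
--     groups.append((start, cur))
--     # pass 2: emit a #line directive before each group, then the group's lines.
--     out = []
--     for s, grp in groups: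
--         out.append('#line %d "%s"' % (s, path))
--         out.extend(grp)
--     return "\n".join(out)
-- ===== Notes on version B (the rewrite author's own statement) =====
-- stated objective: alternative
-- what changed: Replaces the single carried-flag scan with a two-pass decomposition: first partition the physical lines into logical-line groups keyed by their starting line number (continuation decided by looking at the last line of the current group), then emit a directive per group followed by its lines.
import Mathlib
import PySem

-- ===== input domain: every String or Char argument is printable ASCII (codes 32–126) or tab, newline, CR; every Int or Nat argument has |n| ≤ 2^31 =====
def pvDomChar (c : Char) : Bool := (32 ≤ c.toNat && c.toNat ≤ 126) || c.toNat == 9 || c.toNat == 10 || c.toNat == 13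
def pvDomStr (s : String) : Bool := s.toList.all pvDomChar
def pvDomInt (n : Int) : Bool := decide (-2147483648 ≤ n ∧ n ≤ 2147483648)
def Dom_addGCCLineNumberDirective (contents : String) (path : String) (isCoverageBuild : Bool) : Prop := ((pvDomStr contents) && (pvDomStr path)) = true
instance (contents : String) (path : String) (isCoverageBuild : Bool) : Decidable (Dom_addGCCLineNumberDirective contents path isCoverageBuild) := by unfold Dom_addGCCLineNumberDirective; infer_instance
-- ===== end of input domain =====

-- B replaces A's carried-flag scan by a two-pass decomposition (group the physical
-- lines into logical-line groups, then emit one directive per group); same result, same cost.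

-- shared helper: the Python format expression '#line %d "%s"' % (n, path)
def pvFmtLine (n : Int) (path : String) : String :=
  "#line " ++ PySem.Int.toStr n ++ " \"" ++ path ++ "\""

-- ===== PORT A =====
-- one iteration of A's loop body, on state (lineNumber, outContents, lastLineEndedInBackslash)
def pvStepA (path : String) (st : Int × List String × Bool) (line : String) : Int × List String × Bool :=
  let ln := st.1
  let out := st.2.1
  let lastBS := st.2.2
  let out := if !lastBS then out ++ [pvFmtLine ln path] else out
  let out := out ++ [line]
  (ln + 1, out, PySem.Str.endswith line "\\")

def addGCCLineNumberDirective (contents : String) (path : String) (isCoverageBuild : Bool) : String :=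
  if isCoverageBuild then contents
  else
    let lines := (PySem.Str.split? contents "\n").getD []   -- sep "\n" ≠ "", so split? is always `some`
    PySem.Str.join "\n" ((lines.foldl (pvStepA path) (1, [], false)).2.1)

-- ===== PORT B =====
-- one iteration of Source B's first pass, on state (groups, start, cur); p = (i, line)
def pvStepB (st : List (Int × List String) × Int × List String) (p : Int × String) : List (Int × List String) × Int × List String :=
  let groups := st.1
  let start := st.2.1
  let cur := st.2.2
  if PySem.Str.endswith (PySem.List.pyGetD cur (-1) "") "\\" then
    (groups, start, cur ++ [p.2])
  else
    (groups ++ [(start, cur)], p.1, [p.2])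

-- Source B's second pass: a directive per group, then the group's lines
def pvEmitGroups (path : String) (groups : List (Int × List String)) : List String :=
  groups.foldl (fun out g => (out ++ [pvFmtLine g.1 path]) ++ g.2) []

def addGCCLineNumberDirective_alt (contents : String) (path : String) (isCoverageBuild : Bool) : String :=
  if isCoverageBuild then contents
  else
    let lines := (PySem.Str.split? contents "\n").getD []
    let st := (PySem.List.enumerate (lines.drop 1) 2).foldl pvStepB
      ([], 1, [PySem.List.pyGetD lines 0 ""])   -- split("\n") is never empty, so lines[0] is safe
    PySem.Str.join "\n" (pvEmitGroups path (st.1 ++ [(st.2.1, st.2.2)]))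

-- ===== PRECONDITION & SPEC =====
def Spec_addGCCLineNumberDirective (contents : String) (path : String) (isCoverageBuild : Bool) (out : String) : Prop := out = addGCCLineNumberDirective_alt contents path isCoverageBuild
instance (contents : String) (path : String) (isCoverageBuild : Bool) (out : String) : Decidable (Spec_addGCCLineNumberDirective contents path isCoverageBuild out) := by unfold Spec_addGCCLineNumberDirective; infer_instance

-- ===== CLAIM (what is proved, stated in full; the proofs are below) =====
def Claim_equal_addGCCLineNumberDirective : Prop := ∀ (contents : String) (path : String) (isCoverageBuild : Bool), Dom_addGCCLineNumberDirective contents path isCoverageBuild → Spec_addGCCLineNumberDirective contents path isCoverageBuild (addGCCLineNumberDirective contents path isCoverageBuild)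

-- ===== LEMMAS AND PROOFS =====

theorem pv_go_ne_nil (sep : List Char) : ∀ (fuel : Nat) (l cur : List Char) (acc : List (List Char)),
    PySem.Chars.splitOn.go sep fuel l cur acc ≠ [] := by
  intro fuel
  induction fuel with
  | zero => intro l cur acc; simp [PySem.Chars.splitOn.go]
  | succ n ih =>
    intro l cur acc
    cases l with
    | nil => simp [PySem.Chars.splitOn.go]
    | cons c rest =>
      rw [PySem.Chars.splitOn.go]
      split
      · exact ih _ _ _
      · exact ih _ _ _

theorem pv_lines_ne_nil (contents : String) : (PySem.Str.split? contents "\n").getD [] ≠ [] := by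
  simp [PySem.Str.split?, PySem.Chars.split?, PySem.Chars.splitOn]
  intro h
  exact absurd h (by simpa using pv_go_ne_nil _ _ _ _ _)

theorem pvEmitGroups_append (path : String) (gs : List (Int × List String)) (g : Int × List String) :
    pvEmitGroups path (gs ++ [g]) = (pvEmitGroups path gs ++ [pvFmtLine g.1 path]) ++ g.2 := by
  simp [pvEmitGroups, List.foldl_append]

theorem pv_loop_eq (path : String) (rest : List String) :
    ∀ (ln start : Int) (groups : List (Int × List String)) (cur : List String),
    (rest.foldl (pvStepA path)
        (ln, (pvEmitGroups path groups ++ [pvFmtLine start path]) ++ cur,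
         PySem.Str.endswith (PySem.List.pyGetD cur (-1) "") "\\")).2.1
    = pvEmitGroups path
        (((PySem.List.enumerate rest ln).foldl pvStepB (groups, start, cur)).1
          ++ [(((PySem.List.enumerate rest ln).foldl pvStepB (groups, start, cur)).2.1,
               ((PySem.List.enumerate rest ln).foldl pvStepB (groups, start, cur)).2.2)]) := by
  induction rest with
  | nil =>
    intro ln start groups cur
    simp [PySem.List.enumerate, pvEmitGroups_append]
  | cons line rest ih =>
    intro ln start groups cur
    rw [PySem.List.enumerate_cons]
    by_cases hb : PySem.Str.endswith (PySem.List.pyGetD cur (-1) "") "\\" = true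
    · -- continuation line: B extends the current group, A just appends the line
      have hbC : PySem.Chars.endswith (PySem.List.pyGetD cur (-1) "").toList ['\\'] = true := by
        simpa using hb
      have hA : pvStepA path
          (ln, (pvEmitGroups path groups ++ [pvFmtLine start path]) ++ cur, PySem.Str.endswith (PySem.List.pyGetD cur (-1) "") "\\") line
          = (ln + 1, (pvEmitGroups path groups ++ [pvFmtLine start path]) ++ (cur ++ [line]),
             PySem.Str.endswith line "\\") := by
        simp [pvStepA, hbC]
      have hB : pvStepB (groups, start, cur) (ln, line) = (groups, start, cur ++ [line]) := by
        simp [pvStepB, hbC]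
      rw [List.foldl_cons, List.foldl_cons, hA, hB]
      have := ih (ln + 1) start groups (cur ++ [line])
      rwa [PySem.List.pyGetD_neg_one_append_singleton] at this
    · -- fresh logical line: B closes the group, A emits a directive
      have hb' : PySem.Str.endswith (PySem.List.pyGetD cur (-1) "") "\\" = false := by
        simpa using hb
      have hbC : PySem.Chars.endswith (PySem.List.pyGetD cur (-1) "").toList ['\\'] = false := by
        simpa using hb'
      have hA : pvStepA path
          (ln, (pvEmitGroups path groups ++ [pvFmtLine start path]) ++ cur, PySem.Str.endswith (PySem.List.pyGetD cur (-1) "") "\\") line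
          = (ln + 1, (pvEmitGroups path (groups ++ [(start, cur)]) ++ [pvFmtLine ln path]) ++ [line],
             PySem.Str.endswith line "\\") := by
        simp [pvStepA, hbC, pvEmitGroups_append]
      have hB : pvStepB (groups, start, cur) (ln, line) = (groups ++ [(start, cur)], ln, [line]) := by
        simp [pvStepB, hbC]
      rw [List.foldl_cons, List.foldl_cons, hA, hB]
      have := ih (ln + 1) ln (groups ++ [(start, cur)]) [line]
      rwa [show PySem.List.pyGetD [line] (-1) "" = line from
        PySem.List.pyGetD_neg_one_append_singleton [] line ""] at this

theorem pv_main (path l0 : String) (ls : List String) :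
    ((l0 :: ls).foldl (pvStepA path) (1, [], false)).2.1
    = pvEmitGroups path
        (((PySem.List.enumerate ls 2).foldl pvStepB ([], 1, [l0])).1
          ++ [(((PySem.List.enumerate ls 2).foldl pvStepB ([], 1, [l0])).2.1,
               ((PySem.List.enumerate ls 2).foldl pvStepB ([], 1, [l0])).2.2)]) := by
  have hget : PySem.List.pyGetD [l0] (-1) "" = l0 := by
    simpa using PySem.List.pyGetD_neg_one_append_singleton ([] : List String) l0 ""
  have h0 : pvStepA path (1, [], false) l0
      = (2, (pvEmitGroups path [] ++ [pvFmtLine 1 path]) ++ [l0],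
         PySem.Str.endswith (PySem.List.pyGetD [l0] (-1) "") "\\") := by
    simp [pvStepA, pvEmitGroups, hget]
  rw [List.foldl_cons, h0]
  exact pv_loop_eq path ls 2 1 [] [l0]

-- ===== VERDICT (by name: the statement is the Claim_ definition above) =====
theorem addGCCLineNumberDirective_spec : Claim_equal_addGCCLineNumberDirective := by
  intro contents path isCoverageBuild _
  cases isCoverageBuild with
  | true =>
    show addGCCLineNumberDirective contents path true
        = addGCCLineNumberDirective_alt contents path true
    simp [addGCCLineNumberDirective, addGCCLineNumberDirective_alt]
  | false =>
    show PySem.Str.join "\n"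
        ((((PySem.Str.split? contents "\n").getD []).foldl (pvStepA path) (1, [], false)).2.1)
      = PySem.Str.join "\n" (pvEmitGroups path
          (((PySem.List.enumerate (((PySem.Str.split? contents "\n").getD []).drop 1) 2).foldl pvStepB
              ([], 1, [PySem.List.pyGetD ((PySem.Str.split? contents "\n").getD []) 0 ""])).1
            ++ [(((PySem.List.enumerate (((PySem.Str.split? contents "\n").getD []).drop 1) 2).foldl pvStepB
              ([], 1, [PySem.List.pyGetD ((PySem.Str.split? contents "\n").getD []) 0 ""])).2.1,
                ((PySem.List.enumerate (((PySem.Str.split? contents "\n").getD []).drop 1) 2).foldl pvStepB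
              ([], 1, [PySem.List.pyGetD ((PySem.Str.split? contents "\n").getD []) 0 ""])).2.2)]))
    obtain ⟨l0, ls, hls⟩ : ∃ l0 ls, (PySem.Str.split? contents "\n").getD [] = l0 :: ls := by
      cases h : (PySem.Str.split? contents "\n").getD [] with
      | nil => exact absurd h (pv_lines_ne_nil contents)
      | cons a b => exact ⟨a, b, rfl⟩
    rw [hls, PySem.List.pyGetD_zero_cons, List.drop_succ_cons, List.drop_zero]
    exact congrArg _ (pv_main path l0 ls)
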